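-- pv_equiv track=rewrite | github.com/karansingla06/ice-ner | ice_commons/er/utils/crf_utils.py | get_dandsls
-- ===== SOURCE A (Python) =====
-- def get_dandsls(token, p='/'):
--     bd = False
--     bdd = False
--     for c in token:
--         if c.isdigit():
--             bd = True
--         elif c == p or c == "\/":
--             bdd = True
--         else:
--             return False
--     return bd and bdd
-- ===== SOURCE B (Python) =====
-- def get_dandsls(token, p='/'):
--     # three separate passes: validity + two existence scans
--     if not all(c.isdigit() or c == p or c == "\/" for c in token):
--         return False
--     return any(c.isdigit() for c in token) and \
--            any((not c.isdigit()) and (c == p or c == "\/") for c in token)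
-- ===== Notes on version B (the rewrite author's own statement) =====
-- stated objective: simpler
-- what changed: Replaced the single accumulator loop with early return by three separate declarative passes: an all(...) validity check followed by two any(...) existence scans (the separator scan restricted to non-digit chars, matching A's elif).
import Mathlib
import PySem

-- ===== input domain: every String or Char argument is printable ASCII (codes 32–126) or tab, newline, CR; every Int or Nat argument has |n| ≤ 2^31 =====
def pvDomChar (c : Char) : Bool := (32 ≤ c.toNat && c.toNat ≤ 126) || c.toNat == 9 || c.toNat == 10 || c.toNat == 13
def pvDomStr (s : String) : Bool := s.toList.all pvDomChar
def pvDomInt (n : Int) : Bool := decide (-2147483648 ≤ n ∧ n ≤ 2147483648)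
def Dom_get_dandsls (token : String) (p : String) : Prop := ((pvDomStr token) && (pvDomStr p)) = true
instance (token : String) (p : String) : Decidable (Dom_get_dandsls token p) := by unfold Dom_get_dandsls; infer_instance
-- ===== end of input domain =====

-- B replaces A's single accumulator loop (early return) by three separate passes: an all-validity check plus two any-existence scans; same O(n) cost, plainer to read.


-- `c == p` compares a one-char string with the string p; Python's "\/" is the TWO-char string \ / (unrecognized escape kept literally), so that comparison is dead but ported literally.
def pvCharEqStr (c : Char) (p : String) : Bool := String.mk [c] == p
-- Char.isDigit is exact for Python's str.isdigit on the printable-ASCII domain.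

-- ===== PORT A =====
def get_dandsls_go (p : String) : List Char → Bool → Bool → Bool
  | [], bd, bdd => bd && bdd
  | c :: cs, bd, bdd =>
    if c.isDigit then get_dandsls_go p cs true bdd
    else if pvCharEqStr c p || pvCharEqStr c "\\/" then get_dandsls_go p cs bd true
    else false

def get_dandsls (token : String) (p : String) : Bool :=
  get_dandsls_go p token.toList false false

-- ===== PORT B =====
def get_dandsls_alt (token : String) (p : String) : Bool :=
  if token.toList.all (fun c => c.isDigit || (pvCharEqStr c p || pvCharEqStr c "\\/")) then
    token.toList.any (fun c => c.isDigit) &&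
    token.toList.any (fun c => !c.isDigit && (pvCharEqStr c p || pvCharEqStr c "\\/"))
  else false

-- ===== PRECONDITION & SPEC =====
def Spec_get_dandsls (token : String) (p : String) (out : Bool) : Prop := out = get_dandsls_alt token p
instance (token : String) (p : String) (out : Bool) : Decidable (Spec_get_dandsls token p out) := by unfold Spec_get_dandsls; infer_instance

-- ===== CLAIM (what is proved, stated in full; the proofs are below) =====
def Claim_equal_get_dandsls : Prop := ∀ (token : String) (p : String), Dom_get_dandsls token p → Spec_get_dandsls token p (get_dandsls token p)

-- ===== LEMMAS AND PROOFS =====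
theorem get_dandsls_go_eq (p : String) (l : List Char) (bd bdd : Bool) :
    get_dandsls_go p l bd bdd =
      (l.all (fun c => c.isDigit || (pvCharEqStr c p || pvCharEqStr c "\\/")) &&
       (bd || l.any (fun c => c.isDigit)) &&
       (bdd || l.any (fun c => !c.isDigit && (pvCharEqStr c p || pvCharEqStr c "\\/")))) := by
  induction l generalizing bd bdd with
  | nil => simp [get_dandsls_go]
  | cons c cs ih =>
    by_cases hd : c.isDigit <;> by_cases hs : (pvCharEqStr c p || pvCharEqStr c "\\/") = true <;>
      simp [get_dandsls_go, hd, hs, ih]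

-- ===== VERDICT (by name: the statement is the Claim_ definition above) =====
theorem get_dandsls_spec : Claim_equal_get_dandsls := by
  intro token p _
  unfold Spec_get_dandsls get_dandsls get_dandsls_alt
  rw [get_dandsls_go_eq]
  by_cases h : (token.toList.all (fun c => c.isDigit || (pvCharEqStr c p || pvCharEqStr c "\\/"))) = true <;>
    simp [h]
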